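-- pv_equiv track=rewrite | github.com/Tellysone87/Data-in-motion-Challenges | week32/week32Medium.py | sum_common
-- ===== SOURCE A (Python) =====
-- def sum_common(lst1, lst2, lst3):
--     """ Return the sum of integers which are common in all three lists. """
--     sum = 0 # variable to hold sum
--     combined_list = lst1+lst2+lst3 # combined all three lists   Ex: [1, 2, 3, 5, 3, 2, 7, 3, 2]
--     count_dict = {} # empty dictionary to store the number of repeats
--
--     if not lst1 or not lst2 or not lst3: # case is a list is empty
--         return "No common integers"
--
--     for num in combined_list: # loop through all combined numbers,
--         count_dict[num] = count_dict.get(num, 0) + 1  # am store the total count per number.    Ex. {1: 1, 2: 3, 3: 3, 5: 1, 7: 1}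
--
--     for num_key in count_dict: # since there is always 3 list,
--         if count_dict[num_key] % 3 == 0: # if the total count is a multiple of 3
--             sum+=num_key * (count_dict[num_key]//3) # we add the number times the count divided by 3.   Ex. 2: 3, 3: 3 --> (2*1) + (3*1) = 5
--
--     return sum
-- ===== SOURCE B (Python) =====
-- def sum_common(lst1, lst2, lst3):
--     """ Return the sum of integers which are common in all three lists. """
--     if not lst1 or not lst2 or not lst3:
--         return "No common integers"
--     s = sorted(lst1 + lst2 + lst3)
--     total = 0
--     i = 0
--     while i < len(s):
--         j = i
--         while j < len(s) and s[j] == s[i]: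
--             j += 1
--         n = j - i
--         if n % 3 == 0:
--             total += s[i] * (n // 3)
--         i = j
--     return total
-- ===== Notes on version B (the rewrite author's own statement) =====
-- stated objective: alternative
-- what changed: Replaces the counting dictionary and the subsequent pass over its keys by sort-then-scan: sort the combined list once and walk it with two indices, measuring each run of equal values and adding value*(n//3) when the run length n is a multiple of 3.
-- outside the precondition, e.g. on sum_common([], [1], [2]): A returns 'No common integers', B returns 'No common integers'
import Mathlib
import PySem

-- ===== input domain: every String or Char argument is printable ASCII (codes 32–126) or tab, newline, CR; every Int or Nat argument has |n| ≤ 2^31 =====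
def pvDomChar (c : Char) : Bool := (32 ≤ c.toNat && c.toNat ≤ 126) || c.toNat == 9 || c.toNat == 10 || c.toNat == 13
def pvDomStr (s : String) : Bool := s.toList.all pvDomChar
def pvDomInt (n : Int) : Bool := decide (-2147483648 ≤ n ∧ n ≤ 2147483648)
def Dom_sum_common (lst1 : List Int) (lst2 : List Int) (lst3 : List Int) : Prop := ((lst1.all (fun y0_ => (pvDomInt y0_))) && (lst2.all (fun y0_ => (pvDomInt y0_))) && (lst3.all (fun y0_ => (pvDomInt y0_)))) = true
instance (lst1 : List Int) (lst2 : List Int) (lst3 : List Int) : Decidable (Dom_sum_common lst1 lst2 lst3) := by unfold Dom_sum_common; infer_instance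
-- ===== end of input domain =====

-- B replaces A's counting dictionary by a sort-then-scan over runs of equal values (alternative
-- algorithm of similar cost). Equivalence is about the return value; on an empty input list the
-- Python A (and B) return the string "No common integers", not an int — excluded by Pre_.

-- ===== PORT A =====
-- The 'if not lst1 …: return "No common integers"' branch returns a non-int value and is outside
-- Pre_sum_common; the port covers the integer-returning path.
def sum_common (lst1 : List Int) (lst2 : List Int) (lst3 : List Int) : Int :=
  let combined := lst1 ++ lst2 ++ lst3
  let d := combined.foldl (fun d x => d.insert x (d.getD x 0 + 1)) PySem.Dict.empty
  d.keys.foldl (fun s k =>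
    if PySem.Int.mod (d.getD k 0) 3 == 0 then s + k * PySem.Int.floordiv (d.getD k 0) 3 else s) 0

-- ===== PORT B =====
-- the outer while loop of Source B: each step consumes one run of equal values (the inner while =
-- takeWhile/dropWhile split), adds value*(n//3) if the run length n is a multiple of 3.
def pvRunScan : List Int → Int
  | [] => 0
  | x :: xs =>
    let n : Int := 1 + ((xs.takeWhile (fun y => y == x)).length : Int)
    (if PySem.Int.mod n 3 == 0 then x * PySem.Int.floordiv n 3 else 0) +
      pvRunScan (xs.dropWhile (fun y => y == x))
termination_by l => l.length
decreasing_by simpa using Nat.lt_succ_of_le (List.length_dropWhile_le _ xs)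

def sum_common_alt (lst1 : List Int) (lst2 : List Int) (lst3 : List Int) : Int :=
  pvRunScan (PySem.List.sorted (lst1 ++ lst2 ++ lst3) (fun x => x) false)

-- ===== PRECONDITION & SPEC =====
-- Pre_ excludes inputs with an empty argument list: there A returns the string
-- "No common integers", which is not a value of the declared Int result type.
def Pre_sum_common (lst1 : List Int) (lst2 : List Int) (lst3 : List Int) : Prop :=
  lst1 ≠ [] ∧ lst2 ≠ [] ∧ lst3 ≠ []
instance (lst1 : List Int) (lst2 : List Int) (lst3 : List Int) : Decidable (Pre_sum_common lst1 lst2 lst3) := by unfold Pre_sum_common; infer_instance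

def pvWitness_sum_common : List Int × List Int × List Int := ([1, 2], [2, 1], [1, 2])

def Spec_sum_common (lst1 : List Int) (lst2 : List Int) (lst3 : List Int) (out : Int) : Prop := out = sum_common_alt lst1 lst2 lst3
instance (lst1 : List Int) (lst2 : List Int) (lst3 : List Int) (out : Int) : Decidable (Spec_sum_common lst1 lst2 lst3 out) := by unfold Spec_sum_common; infer_instance

-- ===== CLAIM (what is proved, stated in full; the proofs are below) =====
def Claim_equal_sum_common : Prop := ∀ (lst1 : List Int) (lst2 : List Int) (lst3 : List Int), Dom_sum_common lst1 lst2 lst3 → Pre_sum_common lst1 lst2 lst3 → Spec_sum_common lst1 lst2 lst3 (sum_common lst1 lst2 lst3)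

-- ===== LEMMAS AND PROOFS =====

-- the per-value contribution, in terms of the multiset of combined values
def pvF (c : List Int) (v : Int) : Int :=
  if PySem.Int.mod ((c.count v : Nat) : Int) 3 == 0
  then v * PySem.Int.floordiv ((c.count v : Nat) : Int) 3 else 0

lemma sum_common_eq (lst1 lst2 lst3 : List Int) :
    sum_common lst1 lst2 lst3
      = ((PySem.List.dedup (lst1 ++ lst2 ++ lst3)).map (pvF (lst1 ++ lst2 ++ lst3))).sum := by
  show (let combined := lst1 ++ lst2 ++ lst3
    let d := combined.foldl (fun d x => d.insert x (d.getD x 0 + 1)) PySem.Dict.empty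
    d.keys.foldl (fun s k =>
      if PySem.Int.mod (d.getD k 0) 3 == 0 then s + k * PySem.Int.floordiv (d.getD k 0) 3 else s) 0) = _
  simp only []
  rw [PySem.Dict.foldl_insert_getD_add_one_eq_counter, PySem.Dict.keys_counter]
  have h : ∀ (s k : Int),
      (if PySem.Int.mod ((PySem.Dict.counter (lst1 ++ lst2 ++ lst3)).getD k 0) 3 == 0
        then s + k * PySem.Int.floordiv ((PySem.Dict.counter (lst1 ++ lst2 ++ lst3)).getD k 0) 3
        else s)
      = s + pvF (lst1 ++ lst2 ++ lst3) k := by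
    intro s k
    rw [PySem.Dict.getD_counter]
    unfold pvF
    split_ifs <;> simp
  simp only [h]
  rw [PySem.List.foldl_add]
  simp [PySem.List.dedup]

-- head of a dropWhile fails the predicate
lemma dropWhile_head_false {p : Int → Bool} : ∀ (l : List Int) {y ys},
    l.dropWhile p = y :: ys → p y = false := by
  intro l
  induction l with
  | nil => intro y ys h; simp [List.dropWhile] at h
  | cons a t ih =>
    intro y ys h
    by_cases hp : p a
    · rw [List.dropWhile_cons_of_pos hp] at h; exact ih h
    · rw [List.dropWhile_cons_of_neg hp] at h
      cases h; simpa using hp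

-- pushing a fresh element through PySem.Set.add-folds
lemma foldl_add_cons (x : Int) : ∀ (r : List Int) (s : List Int), (∀ y ∈ r, y ≠ x) →
    r.foldl PySem.Set.add (x :: s) = x :: r.foldl PySem.Set.add s := by
  intro r
  induction r with
  | nil => intro s _; rfl
  | cons y t ih =>
    intro s h
    have hyx : y ≠ x := h y (by simp)
    have hadd : PySem.Set.add (x :: s) y = x :: PySem.Set.add s y := by
      simp [PySem.Set.add, hyx]
      split_ifs <;> simp_all
    simp only [List.foldl_cons, hadd]
    exact ih _ (fun z hz => h z (by simp [hz]))

-- adding elements already present is a no-op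
lemma foldl_add_const (x : Int) : ∀ (t : List Int), (∀ y ∈ t, y = x) →
    t.foldl PySem.Set.add [x] = [x] := by
  intro t
  induction t with
  | nil => intro _; rfl
  | cons y t' ih =>
    intro h
    have hy : y = x := h y (by simp)
    have : PySem.Set.add [x] y = [x] := by simp [PySem.Set.add, hy]
    simp only [List.foldl_cons, this]
    exact ih (fun z hz => h z (by simp [hz]))

lemma dedup_run (x : Int) (t r : List Int) (ht : ∀ y ∈ t, y = x) (hr : ∀ y ∈ r, y ≠ x) :
    PySem.List.dedup (x :: (t ++ r)) = x :: PySem.List.dedup r := by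
  simp only [PySem.List.dedup, PySem.Set.ofList, List.foldl_cons, List.foldl_append]
  have h0 : PySem.Set.add PySem.Set.empty x = [x] := by
    simp [PySem.Set.add, PySem.Set.empty]
  rw [h0, foldl_add_const x t ht]
  have : ([x] : List Int) = x :: PySem.Set.empty := rfl
  rw [this, foldl_add_cons x r PySem.Set.empty hr]

lemma runScan_eq : ∀ (s : List Int), s.Pairwise (· ≤ ·) →
    pvRunScan s = ((PySem.List.dedup s).map (pvF s)).sum := by
  intro s
  induction s using pvRunScan.induct with
  | case1 => intro _; simp [pvRunScan, PySem.List.dedup, PySem.Set.ofList, PySem.Set.empty]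
  | case2 x xs ih =>
    intro hpw
    have hsplit : xs.takeWhile (fun y => y == x) ++ xs.dropWhile (fun y => y == x) = xs :=
      List.takeWhile_append_dropWhile
    set t := xs.takeWhile (fun y => y == x) with htdef
    set r := xs.dropWhile (fun y => y == x) with hrdef
    -- every element of t equals x
    have ht : ∀ y ∈ t, y = x := by
      intro y hy
      have := List.mem_takeWhile_imp hy
      simpa using this
    -- x is ≤ everything in xs, and pairwise within xs
    have hle : ∀ y ∈ xs, x ≤ y := (List.pairwise_cons.mp hpw).1
    have hpxs : xs.Pairwise (· ≤ ·) := (List.pairwise_cons.mp hpw).2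
    have hpr : r.Pairwise (· ≤ ·) := List.Pairwise.sublist (List.dropWhile_sublist _) hpxs
    -- no element of r equals x
    have hr : ∀ y ∈ r, y ≠ x := by
      intro y hy
      cases hR : r with
      | nil => rw [hR] at hy; simp at hy
      | cons h0 r' =>
        have hh0 : (h0 == x) = false :=
          dropWhile_head_false (p := fun y => y == x) xs (hrdef.symm.trans hR)
        have hh0x : h0 ≠ x := by simpa using hh0
        rw [hR] at hy
        rcases List.mem_cons.mp hy with rfl | hy'
        · exact hh0x
        · -- y ∈ r', so h0 ≤ y; also x ≤ h0 since h0 ∈ xs; if y = x then h0 = x, contradiction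
          intro hyx
          have h0y : h0 ≤ y := by
            have := (List.pairwise_cons.mp (hR ▸ hpr)).1
            exact this y hy'
          have h0mem : h0 ∈ xs := by
            have : h0 ∈ r := by rw [hR]; simp
            exact (List.dropWhile_sublist _).mem this
          have : x ≤ h0 := hle h0 h0mem
          exact hh0x (le_antisymm (hyx ▸ h0y) this)
    -- run length = count of x in the whole list
    have hcount : ((x :: xs).count x : Int) = 1 + (t.length : Int) := by
      have h1 : xs.count x = t.length := by
        have : xs.count x = t.count x + r.count x := by
          rw [← hsplit]; simp [List.count_append]
        have ht' : t.count x = t.length := by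
          apply List.count_eq_length.mpr
          intro y hy; exact (ht y hy).symm
        have hr' : r.count x = 0 := by
          apply List.count_eq_zero.mpr
          intro hx; exact hr x hx rfl
        omega
      rw [List.count_cons_self, h1]
      push_cast; ring
    -- counts of r-elements agree between s and r
    have hcnt : ∀ v ∈ r, ((x :: xs).count v) = r.count v := by
      intro v hv
      have hvx : v ≠ x := hr v hv
      have : xs.count v = t.count v + r.count v := by
        rw [← hsplit]; simp [List.count_append]
      have ht0 : t.count v = 0 := by
        apply List.count_eq_zero.mpr
        intro hvt; exact hvx (ht v hvt)
      rw [List.count_cons_of_ne (Ne.symm hvx), this, ht0]; omega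
    have hdedup : PySem.List.dedup (x :: xs) = x :: PySem.List.dedup r := by
      rw [← hsplit]; exact dedup_run x t r ht hr
    rw [pvRunScan, hdedup]
    simp only [List.map_cons, List.sum_cons]
    have hFx : pvF (x :: xs) x
        = (if PySem.Int.mod (1 + (t.length : Int)) 3 == 0
           then x * PySem.Int.floordiv (1 + (t.length : Int)) 3 else 0) := by
      unfold pvF; rw [hcount]
    have hFr : (PySem.List.dedup r).map (pvF (x :: xs)) = (PySem.List.dedup r).map (pvF r) := by
      apply List.map_congr_left
      intro v hv
      have hvr : v ∈ r := by
        rw [PySem.List.dedup_eq_ofList] at hv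
        exact (PySem.Set.mem_ofList _ _).mp hv
      unfold pvF; rw [hcnt v hvr]
    rw [hFx, hFr, ← ih hpr]

-- ===== VERDICT (by name: the statement is the Claim_ definition above) =====
theorem sum_common_spec : Claim_equal_sum_common := by
  intro lst1 lst2 lst3 _ _
  unfold Spec_sum_common sum_common_alt
  set c := lst1 ++ lst2 ++ lst3 with hc
  set s := PySem.List.sorted c (fun x => x) false with hs
  have hperm : s.Perm c := PySem.List.sorted_perm c (fun x => x) false
  have hpw : s.Pairwise (· ≤ ·) := by
    simpa using PySem.List.sorted_pairwise c (fun x => x)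
  rw [sum_common_eq, runScan_eq s hpw]
  have hF : ∀ v, pvF s v = pvF c v := by
    intro v; unfold pvF; rw [hperm.count_eq]
  have hdperm : (PySem.List.dedup c).Perm (PySem.List.dedup s) := by
    simp only [PySem.List.dedup_eq_ofList]
    rw [List.perm_ext_iff_of_nodup (PySem.Set.nodup_ofList _) (PySem.Set.nodup_ofList _)]
    intro a
    rw [PySem.Set.mem_ofList, PySem.Set.mem_ofList, hperm.mem_iff]
  calc ((PySem.List.dedup c).map (pvF c)).sum
      = ((PySem.List.dedup s).map (pvF c)).sum := (hdperm.map (pvF c)).sum_eq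
    _ = ((PySem.List.dedup s).map (pvF s)).sum := by
        congr 1; exact (List.map_congr_left (fun v _ => (hF v).symm))
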